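-- pv_equiv track=rewrite | github.com/lilapapierschwein/aoc2025.python | day04/day04.py | remove_accessible_rows
-- ===== SOURCE A (Python) =====
-- def remove_accessible_rows(
--     rolls_cur_row: list[int], rolls_prev_row: list[int], rolls_next_row: list[int]
-- ):
--     inaccessible_rolls: list[int] = []
--     removed_rolls: list[int] = []
--
--     for roll in rolls_cur_row:
--         adj_rolls = 0
--         for i in range(roll - 1, roll + 2):
--             if i in rolls_prev_row:
--                 adj_rolls += 1
--             if i in rolls_next_row:
--                 adj_rolls += 1
--         if roll - 1 in rolls_cur_row:
--             adj_rolls += 1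
--         if roll + 1 in rolls_cur_row:
--             adj_rolls += 1
--
--         if adj_rolls >= 4:
--             inaccessible_rolls.append(roll)
--         else:
--             removed_rolls.append(roll)
--
--     return inaccessible_rolls, removed_rolls
-- ===== SOURCE B (Python) =====
-- def remove_accessible_rows(
--     rolls_cur_row: list[int], rolls_prev_row: list[int], rolls_next_row: list[int]
-- ):
--     # Inverted count table: scatter +1 from each (deduplicated) neighbor value,
--     # then classify each roll by a single O(1) lookup.
--     counts: dict[int, int] = {}
--     for p in set(rolls_prev_row):
--         for x in (p - 1, p, p + 1):
--             counts[x] = counts.get(x, 0) + 1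
--     for n in set(rolls_next_row):
--         for x in (n - 1, n, n + 1):
--             counts[x] = counts.get(x, 0) + 1
--     for c in set(rolls_cur_row):
--         for x in (c - 1, c + 1):
--             counts[x] = counts.get(x, 0) + 1
--
--     inaccessible_rolls: list[int] = []
--     removed_rolls: list[int] = []
--     for roll in rolls_cur_row:
--         if counts.get(roll, 0) >= 4:
--             inaccessible_rolls.append(roll)
--         else:
--             removed_rolls.append(roll)
--     return inaccessible_rolls, removed_rolls
-- ===== Notes on version B (the rewrite author's own statement) =====
-- stated objective: faster
-- what changed: Replaces A's per-roll scan of all three rows (list membership tests per neighbor per roll) with an inverted count table built once by scattering +1 from the deduplicated values of each row, so classification is a single dictionary lookup per roll.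
import Mathlib
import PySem

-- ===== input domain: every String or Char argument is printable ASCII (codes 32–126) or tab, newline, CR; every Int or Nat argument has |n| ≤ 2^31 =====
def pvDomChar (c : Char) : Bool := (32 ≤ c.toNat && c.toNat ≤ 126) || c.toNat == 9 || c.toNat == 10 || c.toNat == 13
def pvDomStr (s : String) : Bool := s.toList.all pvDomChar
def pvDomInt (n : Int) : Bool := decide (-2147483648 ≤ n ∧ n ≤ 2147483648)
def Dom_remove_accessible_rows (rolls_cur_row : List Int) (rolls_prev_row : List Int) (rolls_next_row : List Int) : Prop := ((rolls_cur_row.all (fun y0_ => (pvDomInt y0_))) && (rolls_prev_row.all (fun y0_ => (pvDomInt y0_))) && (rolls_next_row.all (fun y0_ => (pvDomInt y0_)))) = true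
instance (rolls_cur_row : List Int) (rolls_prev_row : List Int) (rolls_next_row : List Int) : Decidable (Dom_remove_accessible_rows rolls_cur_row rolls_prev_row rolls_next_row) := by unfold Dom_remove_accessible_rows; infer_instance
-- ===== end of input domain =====

-- B replaces A's per-roll membership scans of all three rows with an inverted count
-- table scattered once from the deduplicated row values (faster: one lookup per roll).

-- ===== PORT A =====
-- the body of A's outer loop: count of adjacent rolls for one roll
def pvAdjA (rolls_cur_row rolls_prev_row rolls_next_row : List Int) (roll : Int) : Int :=
  let adj := (PySem.List.pyRange (roll - 1) (roll + 2) 1).foldl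
    (fun adj i =>
      let adj := if rolls_prev_row.contains i then adj + 1 else adj
      if rolls_next_row.contains i then adj + 1 else adj) 0
  let adj := if rolls_cur_row.contains (roll - 1) then adj + 1 else adj
  if rolls_cur_row.contains (roll + 1) then adj + 1 else adj

def remove_accessible_rows (rolls_cur_row : List Int) (rolls_prev_row : List Int) (rolls_next_row : List Int) : List Int × List Int :=
  rolls_cur_row.foldl
    (fun acc roll =>
      if pvAdjA rolls_cur_row rolls_prev_row rolls_next_row roll ≥ 4 then
        (acc.1 ++ [roll], acc.2)
      else
        (acc.1, acc.2 ++ [roll]))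
    ([], [])

-- ===== PORT B =====
def remove_accessible_rows_alt (rolls_cur_row : List Int) (rolls_prev_row : List Int) (rolls_next_row : List Int) : List Int × List Int :=
  let counts : PySem.Dict Int Int :=
    (PySem.Set.ofList rolls_prev_row).foldl
      (fun d p => ([p - 1, p, p + 1] : List Int).foldl (fun d x => d.modify x 0 (· + 1)) d)
      PySem.Dict.empty
  let counts :=
    (PySem.Set.ofList rolls_next_row).foldl
      (fun d n => ([n - 1, n, n + 1] : List Int).foldl (fun d x => d.modify x 0 (· + 1)) d)
      counts
  let counts :=
    (PySem.Set.ofList rolls_cur_row).foldl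
      (fun d c => ([c - 1, c + 1] : List Int).foldl (fun d x => d.modify x 0 (· + 1)) d)
      counts
  rolls_cur_row.foldl
    (fun acc roll =>
      if counts.getD roll 0 ≥ 4 then (acc.1 ++ [roll], acc.2) else (acc.1, acc.2 ++ [roll]))
    ([], [])

-- ===== PRECONDITION & SPEC =====
def Spec_remove_accessible_rows (rolls_cur_row : List Int) (rolls_prev_row : List Int) (rolls_next_row : List Int) (out : List Int × List Int) : Prop := out = remove_accessible_rows_alt rolls_cur_row rolls_prev_row rolls_next_row
instance (rolls_cur_row : List Int) (rolls_prev_row : List Int) (rolls_next_row : List Int) (out : List Int × List Int) : Decidable (Spec_remove_accessible_rows rolls_cur_row rolls_prev_row rolls_next_row out) := by unfold Spec_remove_accessible_rows; infer_instance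

-- ===== CLAIM (what is proved, stated in full; the proofs are below) =====
def Claim_equal_remove_accessible_rows : Prop := ∀ (rolls_cur_row : List Int) (rolls_prev_row : List Int) (rolls_next_row : List Int), Dom_remove_accessible_rows rolls_cur_row rolls_prev_row rolls_next_row → Spec_remove_accessible_rows rolls_cur_row rolls_prev_row rolls_next_row (remove_accessible_rows rolls_cur_row rolls_prev_row rolls_next_row)

-- ===== LEMMAS AND PROOFS =====

-- a nested scatter loop is one flat bump loop over the flattened offset list
theorem pv_scatter_flat (g : Int → List Int) (S : List Int) (d : PySem.Dict Int Int) :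
    S.foldl (fun d p => (g p).foldl (fun d x => d.modify x 0 (· + 1)) d) d
      = (S.flatMap g).foldl (fun d x => d.modify x 0 (· + 1)) d := by
  induction S generalizing d with
  | nil => rfl
  | cons p S ih => simp [List.flatMap_cons, List.foldl_append, ih]

-- count of v in the 3-offset flattening = countP of "p is a neighbor of v"
theorem pv_count_flat3 (S : List Int) (v : Int) :
    (S.flatMap fun p => ([p - 1, p, p + 1] : List Int)).count v
      = S.count (v - 1) + S.count v + S.count (v + 1) := by
  induction S with
  | nil => rfl
  | cons p S ih =>
    simp only [List.flatMap_cons, List.count_append, List.count_cons, List.count_nil, beq_iff_eq, ih]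
    split_ifs <;> omega

theorem pv_count_flat2 (S : List Int) (v : Int) :
    (S.flatMap fun p => ([p - 1, p + 1] : List Int)).count v
      = S.count (v - 1) + S.count (v + 1) := by
  induction S with
  | nil => rfl
  | cons p S ih =>
    simp only [List.flatMap_cons, List.count_append, List.count_cons, List.count_nil, beq_iff_eq, ih]
    split_ifs <;> omega

-- on a Nodup list, count is a membership indicator
theorem pv_count_nodup (S : List Int) (h : S.Nodup) (a : Int) :
    (S.count a : Int) = if a ∈ S then 1 else 0 := by
  by_cases hm : a ∈ S
  · simp [List.count_eq_one_of_mem h hm, hm]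
  · simp [List.count_eq_zero_of_not_mem hm, hm]

-- range(roll-1, roll+2) is the 3-element list
theorem pv_range3 (r : Int) : PySem.List.pyRange (r - 1) (r + 2) 1 = [r - 1, r, r + 1] := by
  rw [PySem.List.pyRange_one, show (r + 2 - (r - 1)).toNat = 3 by omega,
      show List.range 3 = [0, 1, 2] from rfl]
  simp only [List.map_cons, List.map_nil, List.cons.injEq, and_true]
  omega

-- A's adjacency count as a sum of membership indicators
set_option maxHeartbeats 1000000 in
theorem pv_adjA_eq (cur prev next : List Int) (r : Int) :
    pvAdjA cur prev next r
      = ((if (r - 1) ∈ prev then 1 else 0) + (if r ∈ prev then 1 else 0) + (if (r + 1) ∈ prev then 1 else 0)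
        + ((if (r - 1) ∈ next then 1 else 0) + (if r ∈ next then 1 else 0) + (if (r + 1) ∈ next then 1 else 0))
        + ((if (r - 1) ∈ cur then 1 else 0) + (if (r + 1) ∈ cur then 1 else 0))) := by
  unfold pvAdjA
  rw [pv_range3]
  simp only [List.foldl_cons, List.foldl_nil, List.contains_iff_mem]
  split_ifs <;> omega

-- B's count table lookup equals A's adjacency count
theorem pv_counts_eq (cur prev next : List Int) (r : Int) :
    (((PySem.Set.ofList cur).foldl
        (fun d c => ([c - 1, c + 1] : List Int).foldl (fun d x => d.modify x 0 (· + 1)) d)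
        ((PySem.Set.ofList next).foldl
          (fun d n => ([n - 1, n, n + 1] : List Int).foldl (fun d x => d.modify x 0 (· + 1)) d)
          ((PySem.Set.ofList prev).foldl
            (fun d p => ([p - 1, p, p + 1] : List Int).foldl (fun d x => d.modify x 0 (· + 1)) d)
            PySem.Dict.empty))).getD r 0)
      = pvAdjA cur prev next r := by
  rw [pv_scatter_flat, pv_scatter_flat, pv_scatter_flat]
  rw [PySem.Dict.getD_foldl_modify_add_one, PySem.Dict.getD_foldl_modify_add_one,
      PySem.Dict.getD_foldl_modify_add_one]
  rw [pv_count_flat3, pv_count_flat3, pv_count_flat2]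
  push_cast
  rw [pv_count_nodup _ (PySem.Set.nodup_ofList prev), pv_count_nodup _ (PySem.Set.nodup_ofList prev),
      pv_count_nodup _ (PySem.Set.nodup_ofList prev),
      pv_count_nodup _ (PySem.Set.nodup_ofList next), pv_count_nodup _ (PySem.Set.nodup_ofList next),
      pv_count_nodup _ (PySem.Set.nodup_ofList next),
      pv_count_nodup _ (PySem.Set.nodup_ofList cur), pv_count_nodup _ (PySem.Set.nodup_ofList cur)]
  rw [pv_adjA_eq]
  simp only [PySem.Set.mem_ofList, PySem.Dict.getD_empty]
  split_ifs <;> omega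

-- ===== VERDICT (by name: the statement is the Claim_ definition above) =====
theorem remove_accessible_rows_spec : Claim_equal_remove_accessible_rows := by
  intro cur prev next _
  unfold Spec_remove_accessible_rows remove_accessible_rows remove_accessible_rows_alt
  have hfun : (fun (acc : List Int × List Int) roll =>
      if pvAdjA cur prev next roll ≥ 4 then (acc.1 ++ [roll], acc.2) else (acc.1, acc.2 ++ [roll]))
    = (fun (acc : List Int × List Int) roll =>
      if (((PySem.Set.ofList cur).foldl
        (fun d c => ([c - 1, c + 1] : List Int).foldl (fun d x => d.modify x 0 (· + 1)) d)
        ((PySem.Set.ofList next).foldl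
          (fun d n => ([n - 1, n, n + 1] : List Int).foldl (fun d x => d.modify x 0 (· + 1)) d)
          ((PySem.Set.ofList prev).foldl
            (fun d p => ([p - 1, p, p + 1] : List Int).foldl (fun d x => d.modify x 0 (· + 1)) d)
            (PySem.Dict.empty : PySem.Dict Int Int)))).getD roll 0) ≥ 4 then (acc.1 ++ [roll], acc.2)
      else (acc.1, acc.2 ++ [roll])) := by
    funext acc roll
    rw [← pv_counts_eq cur prev next roll]
  rw [hfun]
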